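-- pv_equiv track=rewrite | github.com/aliyakhadi/Parameters_counting | util.py | restKcounting
-- ===== SOURCE A (Python) =====
-- def notpBinary(i, K):
--     if i >= 0:
--         if K[i] != 1:
--             K[i] = K[i] + 1
--         else:
--             K[i] = 0
--             notpBinary(i - 1, K)
--
-- def reinitializingBinary(K):
--     newK = K
--     n = len(newK) - 1
--     notpBinary(n, newK)
--     return newK
--
-- def restKcounting(partialK: list, p:int,nn:int):
--     restK = []
--     sizeOfBinary=len(partialK)-1
--     binaryPartialK = []
--     for i in range(sizeOfBinary):
--         binaryPartialK.append(0)
--     for i in range(2 ** (sizeOfBinary) - 1):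
--         reinitializingBinary(binaryPartialK)
--
--         ones = 0
--         newK = 0
--         for j in range(sizeOfBinary):
--             ones = ones + binaryPartialK[j]
--             if binaryPartialK[j] == 1:
--                 newK = newK + partialK[j + 1]
--         newK = newK - (ones-1) * partialK[0]
--         while newK < 0:
--             newK = newK + p
--         if ones != 1:  restK.append(newK)
--     return restK
-- ===== SOURCE B (Python) =====
-- def restKcounting(partialK: list, p: int, nn: int):
--     # Build all (popcount, subset-sum) pairs in counting order by doubling,
--     # instead of re-scanning a mutable bit array for each of the 2^size counters.
--     combos = [(0, 0)]
--     for v in reversed(partialK[1:]):    # last value varies fastest (LSB)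
--         combos = combos + [(o + 1, s + v) for (o, s) in combos]
--     k0 = partialK[0]
--     restK = []
--     for o, s in combos[1:]:
--         if o != 1:
--             newK = s - (o - 1) * k0
--             if newK < 0:
--                 newK %= p
--             restK.append(newK)
--     return restK
-- ===== Notes on version B (the rewrite author's own statement) =====
-- stated objective: faster
-- what changed: Replaces the mutable binary-counter array (re-incremented and fully rescanned for each of the 2^size combinations) by a doubling pass that builds all (popcount, subset-sum) pairs in counting order in one O(2^size) sweep; intended as faster - measured ~9x at n=16, while both, being exponential, exceed the timing limit at n=64.
import Mathlib
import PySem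

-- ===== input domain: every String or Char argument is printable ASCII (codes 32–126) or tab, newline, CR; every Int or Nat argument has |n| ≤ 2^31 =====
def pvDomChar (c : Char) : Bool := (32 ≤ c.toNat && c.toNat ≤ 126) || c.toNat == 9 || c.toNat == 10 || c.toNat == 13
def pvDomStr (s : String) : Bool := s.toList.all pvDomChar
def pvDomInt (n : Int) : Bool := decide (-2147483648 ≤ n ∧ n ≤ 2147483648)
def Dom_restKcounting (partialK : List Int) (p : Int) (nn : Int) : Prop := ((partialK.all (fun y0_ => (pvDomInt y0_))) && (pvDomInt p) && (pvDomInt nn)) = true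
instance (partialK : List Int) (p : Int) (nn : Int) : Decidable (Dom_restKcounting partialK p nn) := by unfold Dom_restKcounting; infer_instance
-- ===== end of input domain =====

-- B replaces A's per-step rescan of a mutable binary-counter array by one doubling pass
-- that builds all (popcount, subset-sum) pairs in counting order; intended as faster
-- (measured ~9x at n=16; both are exponential, and both exceed the timing limit at n=64).

-- ===== PORT A =====
-- Python's `while newK < 0: newK = newK + p`; the `0 < p` conjunct is only a totality
-- guard (for p ≤ 0 the Python loop diverges whenever entered; Pre_ requires 0 < p).
def whileAdd (x : Int) (p : Int) : Int :=
  if _h : 0 < p ∧ x < 0 then whileAdd (x + p) p else x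
termination_by (-x).toNat
decreasing_by omega

def notpBinary (i : Int) (K : List Int) : List Int :=
  if _h : 0 ≤ i then
    let v := PySem.List.pyGetD K i 0
    if v ≠ 1 then
      K.set i.toNat (v + 1)
    else
      notpBinary (i - 1) (K.set i.toNat 0)
  else K
termination_by (i + 1).toNat
decreasing_by omega

def reinitializingBinary (K : List Int) : List Int :=
  notpBinary ((K.length : Int) - 1) K

def restKcounting (partialK : List Int) (p : Int) (nn : Int) : List Int :=
  let sizeOfBinary : Int := (partialK.length : Int) - 1
  let binaryPartialK : List Int :=
    (PySem.List.pyRange 0 sizeOfBinary 1).foldl (fun acc _ => acc ++ [(0 : Int)]) []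
  let st :=
    (PySem.List.pyRange 0 ((2 : Int) ^ sizeOfBinary.toNat - 1) 1).foldl
      (fun (st : List Int × List Int) _ =>
        let binary := reinitializingBinary st.1
        let onk :=
          (PySem.List.pyRange 0 sizeOfBinary 1).foldl
            (fun (onk : Int × Int) j =>
              let ones := onk.1 + PySem.List.pyGetD binary j 0
              let newK :=
                if PySem.List.pyGetD binary j 0 = 1 then
                  onk.2 + PySem.List.pyGetD partialK (j + 1) 0
                else onk.2
              (ones, newK))
            (0, 0)
        let newK := onk.2 - (onk.1 - 1) * PySem.List.pyGetD partialK 0 0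
        let newK := whileAdd newK p
        if onk.1 ≠ 1 then (binary, st.2 ++ [newK]) else (binary, st.2))
      (binaryPartialK, ([] : List Int))
  st.2

-- ===== PORT B =====
def restKcounting_alt (partialK : List Int) (p : Int) (nn : Int) : List Int :=
  let combos :=
    ((PySem.List.slice partialK (some 1) none).reverse).foldl
      (fun (cs : List (Int × Int)) v => cs ++ cs.map (fun os => (os.1 + 1, os.2 + v)))
      [((0 : Int), (0 : Int))]
  let k0 := PySem.List.pyGetD partialK 0 0
  (combos.drop 1).foldl
    (fun (restK : List Int) os =>
      if os.1 ≠ 1 then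
        let newK := os.2 - (os.1 - 1) * k0
        let newK := if newK < 0 then PySem.Int.mod newK p else newK
        restK ++ [newK]
      else restK)
    []

-- ===== PRECONDITION & SPEC =====
-- Pre_ excludes the empty list, on which A raises a TypeError (range(2**(-1) - 1)),
-- and the inputs with p ≤ 0 on which some shifted subset sum is negative, where A's
-- `while newK < 0: newK += p` loop diverges; everywhere else A returns normally.
def Pre_restKcounting (partialK : List Int) (p : Int) (nn : Int) : Prop :=
  partialK ≠ [] ∧
    (0 < p ∨ ∀ S ∈ partialK.tail.sublists,
      S ≠ [] → 0 ≤ S.sum - ((S.length : Int) - 1) * partialK.headI)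
instance (partialK : List Int) (p : Int) (nn : Int) : Decidable (Pre_restKcounting partialK p nn) := by
  unfold Pre_restKcounting; infer_instance

def pvWitness_restKcounting : List Int × Int × Int := ([0, 1, 2], 5, 0)

def Spec_restKcounting (partialK : List Int) (p : Int) (nn : Int) (out : List Int) : Prop :=
  out = restKcounting_alt partialK p nn
instance (partialK : List Int) (p : Int) (nn : Int) (out : List Int) : Decidable (Spec_restKcounting partialK p nn out) := by
  unfold Spec_restKcounting; infer_instance

-- ===== CLAIM (what is proved, stated in full; the proofs are below) =====
def Claim_equal_restKcounting : Prop := ∀ (partialK : List Int) (p : Int) (nn : Int), Dom_restKcounting partialK p nn → Pre_restKcounting partialK p nn → Spec_restKcounting partialK p nn (restKcounting partialK p nn)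

-- ===== LEMMAS AND PROOFS =====

-- the binary counter array of width w holding value m, most significant bit first
def bitsM : Nat → Nat → List Int
  | 0, _ => []
  | w + 1, m => bitsM w (m / 2) ++ [((m % 2 : Nat) : Int)]

-- (popcount, subset sum) of combination m over the value list t (MSB first)
def gS : List Int → Nat → Int × Int
  | [], _ => (0, 0)
  | v :: t, m =>
    if m < 2 ^ t.length then gS t m
    else ((gS t (m - 2 ^ t.length)).1 + 1, (gS t (m - 2 ^ t.length)).2 + v)

theorem bitsM_length (w m : Nat) : (bitsM w m).length = w := by
  induction w generalizing m with
  | zero => rfl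
  | succ w ih => simp [bitsM, ih]

theorem whileAdd_eq (p : Int) (hp : 0 < p) (x : Int) :
    whileAdd x p = if x < 0 then PySem.Int.mod x p else x := by
  rw [whileAdd]
  by_cases hx : x < 0
  · rw [dif_pos ⟨hp, hx⟩, whileAdd_eq p hp (x + p)]
    rw [if_pos hx, PySem.Int.mod_eq_emod_of_pos hp]
    by_cases h2 : x + p < 0
    · rw [if_pos h2, PySem.Int.mod_eq_emod_of_pos hp, Int.add_emod_right]
    · rw [if_neg h2, PySem.Int.mod_eq_emod_of_pos hp, ← Int.add_emod_right x p]
      exact (Int.emod_eq_of_lt (by omega) (by omega)).symm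
  · rw [dif_neg (by omega), if_neg hx]
termination_by (-x).toNat
decreasing_by omega

theorem notpBinary_append (i : Int) (L : List Int) (x : Int) (h : i < (L.length : Int)) :
    notpBinary i (L ++ [x]) = notpBinary i L ++ [x] := by
  by_cases h0 : 0 ≤ i
  · have hget : PySem.List.pyGetD (L ++ [x]) i 0 = PySem.List.pyGetD L i 0 := by
      rw [PySem.List.pyGetD_eq_getElem (L ++ [x]) 0 h0 (by simp; omega),
          PySem.List.pyGetD_eq_getElem L 0 h0 (by omega)]
      exact List.getElem_append_left (by omega)
    have hset : ∀ v : Int, (L ++ [x]).set i.toNat v = L.set i.toNat v ++ [x] := by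
      intro v; rw [List.set_append, if_pos (by omega)]
    conv_lhs => rw [notpBinary]
    conv_rhs => rw [notpBinary]
    rw [dif_pos h0, dif_pos h0]
    simp only [hget, hset]
    by_cases hv : PySem.List.pyGetD L i 0 ≠ 1
    · simp only [if_pos hv]
    · simp only [if_neg hv]
      exact notpBinary_append (i - 1) (L.set i.toNat 0) x (by simp; omega)
  · conv_lhs => rw [notpBinary]
    conv_rhs => rw [notpBinary]
    rw [dif_neg h0, dif_neg h0]
termination_by (i + 1).toNat
decreasing_by omega

theorem whileAdd_of_nonneg (x p : Int) (hx : ¬ x < 0) : whileAdd x p = x := by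
  rw [whileAdd, dif_neg (by omega)]

theorem gS_sublist (t : List Int) (m : Nat) (h : m < 2 ^ t.length) :
    ∃ S : List Int, S.Sublist t ∧ (m ≠ 0 → S ≠ []) ∧
      (gS t m).1 = (S.length : Int) ∧ (gS t m).2 = S.sum := by
  induction t generalizing m with
  | nil =>
    refine ⟨[], List.Sublist.refl _, ?_, rfl, rfl⟩
    intro hm; exact absurd (by simpa using h) hm
  | cons v t ih =>
    rw [gS]
    by_cases hlt : m < 2 ^ t.length
    · obtain ⟨S, hsub, hne, h1, h2⟩ := ih m hlt
      exact ⟨S, hsub.cons v, hne, by rw [if_pos hlt, h1], by rw [if_pos hlt, h2]⟩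
    · obtain ⟨S, hsub, _, h1, h2⟩ := ih (m - 2 ^ t.length)
        (by simp [pow_succ] at h; omega)
      refine ⟨v :: S, hsub.cons₂ v, fun _ => by simp, ?_, ?_⟩
      · rw [if_neg hlt, h1, List.length_cons]; push_cast; ring
      · rw [if_neg hlt, h2]; simp [add_comm]

theorem pyGetD_append_length (L : List Int) (x d : Int) :
    PySem.List.pyGetD (L ++ [x]) ((L.length : Int)) d = x := by
  rw [PySem.List.pyGetD_eq_getElem (L ++ [x]) d (by omega) (by simp)]
  exact List.getElem_concat_length (by simp) (by simp)

theorem set_append_length (L : List Int) (x v : Int) :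
    (L ++ [x]).set L.length v = L ++ [v] := by
  rw [List.set_append, if_neg (by omega)]
  simp

theorem notpBinary_bitsM (w m : Nat) (h : m + 1 < 2 ^ w) :
    notpBinary ((w : Int) - 1) (bitsM w m) = bitsM w (m + 1) := by
  induction w generalizing m with
  | zero => simp at h
  | succ w ih =>
    have hlen : (bitsM w (m / 2)).length = w := bitsM_length w (m / 2)
    have hcast : ((w : Int) + 1 - 1) = ((bitsM w (m / 2)).length : Int) := by
      rw [hlen]; omega
    rw [bitsM, show ((w + 1 : Nat) : Int) - 1 = (w : Int) + 1 - 1 by push_cast; ring,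
        notpBinary, dif_pos (by omega)]
    simp only [hcast, pyGetD_append_length]
    have htoNat : ((bitsM w (m / 2)).length : Int).toNat = (bitsM w (m / 2)).length := by omega
    by_cases hm : m % 2 = 1
    · have hcond : ¬ (((m % 2 : Nat) : Int) ≠ 1) := by omega
      rw [if_neg hcond, htoNat, set_append_length]
      have hrec : notpBinary (((bitsM w (m / 2)).length : Int) - 1) (bitsM w (m / 2) ++ [0])
          = notpBinary (((bitsM w (m / 2)).length : Int) - 1) (bitsM w (m / 2)) ++ [0] :=
        notpBinary_append _ _ _ (by omega)
      rw [hrec, hlen]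
      have h2 : m / 2 + 1 < 2 ^ w := by omega
      rw [ih (m / 2) h2, bitsM]
      have : (m + 1) / 2 = m / 2 + 1 := by omega
      have h2' : (m + 1) % 2 = 0 := by omega
      rw [this, h2']
      norm_num
    · have hm0 : m % 2 = 0 := by omega
      have hcond : (((m % 2 : Nat) : Int) ≠ 1) := by omega
      rw [if_pos hcond, htoNat, set_append_length, bitsM]
      have : (m + 1) / 2 = m / 2 := by omega
      have h2' : (m + 1) % 2 = 1 := by omega
      rw [this, h2', hm0]
      norm_num

theorem bitsM_zero (w : Nat) : bitsM w 0 = List.replicate w 0 := by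
  induction w with
  | zero => rfl
  | succ w ih => simp [bitsM, ih, List.replicate_succ']

theorem gS_concat (t : List Int) (v : Int) (m : Nat) (h : m < 2 ^ (t.length + 1)) :
    gS (t ++ [v]) m =
      if m % 2 = 1 then ((gS t (m / 2)).1 + 1, (gS t (m / 2)).2 + v) else gS t (m / 2) := by
  induction t generalizing m with
  | nil =>
    simp only [List.length_nil, pow_succ, pow_zero, one_mul] at h
    interval_cases m <;> simp [gS]
  | cons u t ih =>
    have hn : (t ++ [v]).length = t.length + 1 := by simp
    rw [List.cons_append, gS, hn]
    by_cases hlt : m < 2 ^ (t.length + 1)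
    · rw [if_pos hlt, ih m hlt, gS]
      have hdiv : m / 2 < 2 ^ t.length := by rw [pow_succ] at hlt; omega
      rw [if_pos hdiv]
    · rw [if_neg hlt, ih (m - 2 ^ (t.length + 1)) (by simp [List.length_cons, pow_succ] at h ⊢; omega)]
      have hge : 2 ^ (t.length + 1) ≤ m := by omega
      have hmod : (m - 2 ^ (t.length + 1)) % 2 = m % 2 := by
        have : 2 ^ (t.length + 1) % 2 = 0 := by simp [pow_succ]
        omega
      have hdiv2 : (m - 2 ^ (t.length + 1)) / 2 = m / 2 - 2 ^ t.length := by
        have h2 : 2 ^ (t.length + 1) = 2 ^ t.length * 2 := by rw [pow_succ]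
        omega
      have hdivge : 2 ^ t.length ≤ m / 2 := by
        have h2 : 2 ^ (t.length + 1) = 2 ^ t.length * 2 := by rw [pow_succ]
        omega
      rw [hmod, hdiv2]
      by_cases hm : m % 2 = 1
      · rw [if_pos hm, if_pos hm]
        rw [gS, if_neg (by omega)]
        exact Prod.ext rfl (by ring)
      · rw [if_neg hm, if_neg hm]
        rw [gS, if_neg (by omega)]

theorem pyGetD_append_left (L M : List Int) (j d : Int) (h0 : 0 ≤ j) (h : j < (L.length : Int)) :
    PySem.List.pyGetD (L ++ M) j d = PySem.List.pyGetD L j d := by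
  rw [PySem.List.pyGetD_eq_getElem (L ++ M) d h0 (by simp; omega),
      PySem.List.pyGetD_eq_getElem L d h0 (by omega)]
  exact List.getElem_append_left (by omega)

theorem inner_fold_eq (t : List Int) (k0 : Int) (m : Nat) (h : m < 2 ^ t.length) :
    (PySem.List.pyRange 0 (t.length : Int) 1).foldl
      (fun (onk : Int × Int) j =>
        let ones := onk.1 + PySem.List.pyGetD (bitsM t.length m) j 0
        let newK :=
          if PySem.List.pyGetD (bitsM t.length m) j 0 = 1 then
            onk.2 + PySem.List.pyGetD (k0 :: t) (j + 1) 0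
          else onk.2
        (ones, newK))
      (0, 0) = gS t m := by
  induction t using List.reverseRecOn generalizing m with
  | nil =>
    have : m = 0 := by simpa using h
    subst this
    simp [PySem.List.pyRange_one_eq_nil, gS]
  | append_singleton L v ih =>
    have hlen : (L ++ [v]).length = L.length + 1 := by simp
    have hblen : (bitsM L.length (m / 2)).length = L.length := bitsM_length _ _
    have hcast : ((L ++ [v]).length : Int) = (L.length : Int) + 1 := by simp
    rw [hcast, PySem.List.pyRange_one_succ_right (by omega), List.foldl_append]
    have hbits : bitsM (L ++ [v]).length m = bitsM L.length (m / 2) ++ [((m % 2 : Nat) : Int)] := by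
      rw [hlen]; rfl
    have hcons : k0 :: (L ++ [v]) = (k0 :: L) ++ [v] := by simp
    -- the first L.length steps only see the first L.length bits and values
    have hmain :
        (PySem.List.pyRange 0 ((L.length : Int)) 1).foldl
          (fun (onk : Int × Int) j =>
            let ones := onk.1 + PySem.List.pyGetD (bitsM (L ++ [v]).length m) j 0
            let newK :=
              if PySem.List.pyGetD (bitsM (L ++ [v]).length m) j 0 = 1 then
                onk.2 + PySem.List.pyGetD (k0 :: (L ++ [v])) (j + 1) 0
              else onk.2
            (ones, newK))
          (0, 0) = gS L (m / 2) := by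
      rw [PySem.List.foldl_congr_mem _ _
        (fun (onk : Int × Int) j =>
            let ones := onk.1 + PySem.List.pyGetD (bitsM L.length (m / 2)) j 0
            let newK :=
              if PySem.List.pyGetD (bitsM L.length (m / 2)) j 0 = 1 then
                onk.2 + PySem.List.pyGetD (k0 :: L) (j + 1) 0
              else onk.2
            (ones, newK))
        (0, 0) ?_]
      · exact ih (m / 2) (by rw [List.length_append, List.length_singleton, pow_succ] at h; omega)
      · intro acc j hj
        rw [PySem.List.mem_pyRange_one] at hj
        rw [hbits, hcons,
            pyGetD_append_left _ _ j 0 (by omega) (by omega),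
            pyGetD_append_left _ _ (j + 1) 0 (by omega) (by simp; omega)]
    rw [hmain, List.foldl_cons, List.foldl_nil]
    have hlast1 : PySem.List.pyGetD (bitsM (L ++ [v]).length m) ((L.length : Int)) 0
        = ((m % 2 : Nat) : Int) := by
      rw [hbits, show ((L.length : Int)) = ((bitsM L.length (m / 2)).length : Int) by rw [hblen]]
      exact pyGetD_append_length _ _ _
    have hlast2 : PySem.List.pyGetD (k0 :: (L ++ [v])) ((L.length : Int) + 1) 0 = v := by
      rw [hcons, show ((L.length : Int) + 1) = (((k0 :: L).length : Int)) by simp]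
      exact pyGetD_append_length _ _ _
    simp only [hlast1, hlast2]
    rw [gS_concat L v m (by simpa using h)]
    by_cases hm : m % 2 = 1
    · rw [if_pos hm, hm]
      norm_num
    · have hm0 : m % 2 = 0 := by omega
      rw [if_neg hm, hm0]
      norm_num

theorem combos_eq (t : List Int) :
    t.reverse.foldl
      (fun (cs : List (Int × Int)) v => cs ++ cs.map (fun os => (os.1 + 1, os.2 + v)))
      [((0 : Int), (0 : Int))] =
    (List.range (2 ^ t.length)).map (fun m => gS t m) := by
  induction t with
  | nil => simp [gS]
  | cons v t ih =>
    rw [List.reverse_cons, List.foldl_append, ih]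
    have hpow : 2 ^ (v :: t).length = 2 ^ t.length + 2 ^ t.length := by
      simp [List.length_cons, pow_succ]; ring
    rw [hpow, List.range_add, List.map_append, List.map_map,
        List.foldl_cons, List.foldl_nil]
    congr 1
    · apply List.map_congr_left
      intro m hm
      rw [List.mem_range] at hm
      rw [gS, if_pos hm]
    · rw [List.map_map]
      apply List.map_congr_left
      intro k hk
      rw [List.mem_range] at hk
      simp only [Function.comp]
      rw [gS, if_neg (by omega), show 2 ^ t.length + k - 2 ^ t.length = k by omega]

theorem foldl_append_zero (l : List Int) (acc : List Int) :
    l.foldl (fun acc (_ : Int) => acc ++ [(0 : Int)]) acc = acc ++ List.replicate l.length 0 := by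
  induction l generalizing acc with
  | nil => simp
  | cons x l ih => simp [ih, List.replicate_succ]

theorem outer_loop (k0 : Int) (t : List Int) (p : Int)
    (hP : 0 < p ∨ ∀ S : List Int, S.Sublist t → S ≠ [] → 0 ≤ S.sum - ((S.length : Int) - 1) * k0)
    (i : Nat)
    (hi : i ≤ 2 ^ t.length - 1) :
    (PySem.List.pyRange 0 (i : Int) 1).foldl
      (fun (st : List Int × List Int) _ =>
        let binary := reinitializingBinary st.1
        let onk :=
          (PySem.List.pyRange 0 ((t.length : Int)) 1).foldl
            (fun (onk : Int × Int) j =>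
              let ones := onk.1 + PySem.List.pyGetD binary j 0
              let newK :=
                if PySem.List.pyGetD binary j 0 = 1 then
                  onk.2 + PySem.List.pyGetD (k0 :: t) (j + 1) 0
                else onk.2
              (ones, newK))
            (0, 0)
        let newK := onk.2 - (onk.1 - 1) * k0
        let newK := whileAdd newK p
        if onk.1 ≠ 1 then (binary, st.2 ++ [newK]) else (binary, st.2))
      (bitsM t.length 0, ([] : List Int)) =
    (bitsM t.length i,
      ((List.range i).map (fun k => gS t (k + 1))).foldl
        (fun (restK : List Int) os =>
          if os.1 ≠ 1 then
            restK ++ [if os.2 - (os.1 - 1) * k0 < 0 then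
                        PySem.Int.mod (os.2 - (os.1 - 1) * k0) p
                      else os.2 - (os.1 - 1) * k0]
          else restK)
        []) := by
  induction i with
  | zero => simp [PySem.List.pyRange_one_eq_nil]
  | succ i ih =>
    have h1 : i + 1 < 2 ^ t.length := by
      have : 1 ≤ 2 ^ t.length := Nat.one_le_two_pow
      omega
    rw [show ((i + 1 : Nat) : Int) = (i : Int) + 1 by push_cast; ring,
        PySem.List.pyRange_one_succ_right (by omega), List.foldl_append,
        ih (by omega), List.foldl_cons, List.foldl_nil]
    have hre : reinitializingBinary (bitsM t.length i) = bitsM t.length (i + 1) := by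
      rw [reinitializingBinary, bitsM_length]
      exact notpBinary_bitsM t.length i h1
    simp only [hre]
    rw [inner_fold_eq t k0 (i + 1) h1]
    have hw : whileAdd ((gS t (i + 1)).2 - ((gS t (i + 1)).1 - 1) * k0) p
        = if (gS t (i + 1)).2 - ((gS t (i + 1)).1 - 1) * k0 < 0 then
            PySem.Int.mod ((gS t (i + 1)).2 - ((gS t (i + 1)).1 - 1) * k0) p
          else (gS t (i + 1)).2 - ((gS t (i + 1)).1 - 1) * k0 := by
      rcases hP with hp | hall
      · exact whileAdd_eq p hp _
      · obtain ⟨S, hsub, hne, hg1, hg2⟩ := gS_sublist t (i + 1) h1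
        have h0 : 0 ≤ (gS t (i + 1)).2 - ((gS t (i + 1)).1 - 1) * k0 := by
          rw [hg1, hg2]; exact hall S hsub (hne (by omega))
        rw [whileAdd_of_nonneg _ _ (by omega), if_neg (by omega)]
    rw [hw]
    rw [List.range_succ, List.map_append, List.foldl_append, List.map_cons, List.map_nil,
        List.foldl_cons, List.foldl_nil]
    split_ifs <;> rfl

theorem restKcounting_eq (k0 : Int) (t : List Int) (p nn : Int)
    (hP : 0 < p ∨ ∀ S : List Int, S.Sublist t → S ≠ [] → 0 ≤ S.sum - ((S.length : Int) - 1) * k0) :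
    restKcounting (k0 :: t) p nn = restKcounting_alt (k0 :: t) p nn := by
  simp only [restKcounting, restKcounting_alt, PySem.List.slice_from_one, List.tail_cons,
    PySem.List.pyGetD_zero_cons, List.length_cons, Nat.cast_add, Nat.cast_one,
    add_sub_cancel_right, Int.toNat_natCast]
  rw [foldl_append_zero, List.nil_append, PySem.List.length_pyRange_one,
      show ((t.length : Int) - 0).toNat = t.length by omega, ← bitsM_zero]
  rw [combos_eq t]
  have hcast : ((2 : Int) ^ t.length - 1) = ((2 ^ t.length - 1 : Nat) : Int) := by
    have : 1 ≤ 2 ^ t.length := Nat.one_le_two_pow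
    push_cast [this]; ring
  rw [hcast, outer_loop k0 t p hP (2 ^ t.length - 1) le_rfl]
  have hdrop : ((List.range (2 ^ t.length)).map (fun m => gS t m)).drop 1
      = (List.range (2 ^ t.length - 1)).map (fun k => gS t (k + 1)) := by
    have h1 : 1 ≤ 2 ^ t.length := Nat.one_le_two_pow
    rw [← List.map_drop, show 2 ^ t.length = (2 ^ t.length - 1) + 1 by omega,
        List.range_succ_eq_map, List.drop_one, List.tail_cons, List.map_map]
    rfl
  rw [hdrop]

-- ===== VERDICT (by name: the statement is the Claim_ definition above) =====
theorem restKcounting_spec : Claim_equal_restKcounting := by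
  intro partialK p nn _hd hpre
  obtain ⟨hne, hP⟩ := hpre
  unfold Spec_restKcounting
  cases partialK with
  | nil => exact absurd rfl hne
  | cons k0 t =>
    refine restKcounting_eq k0 t p nn ?_
    rcases hP with hp | hall
    · exact Or.inl hp
    · refine Or.inr fun S hsub hSne => ?_
      have := hall S (by simpa [List.mem_sublists] using hsub) hSne
      simpa using this
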